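-- pv_equiv track=rewrite | github.com/whglamrock/leetcode_series | leetcode1522 Diameter of N-Ary Tree.py | findLongestAnd2ndLongestPaths
-- ===== SOURCE A (Python) =====
-- from typing import Dict, List
--
-- def findLongestAnd2ndLongestPaths(depths: List[int]) -> List[int]:
--     longest = max(depths[0], depths[1])
--     secondLongest = min(depths[0], depths[1])
--     for i in range(2, len(depths)):
--         depth = depths[i]
--         # need to update both
--         if depth > longest:
--             secondLongest = longest
--             longest = depth
--         elif depth > secondLongest:
--             secondLongest = depth
--
--     return [longest, secondLongest]
-- ===== SOURCE B (Python) =====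
-- def findLongestAnd2ndLongestPaths(depths):
--     s = sorted(depths, reverse=True)
--     return [s[0], s[1]]
-- ===== Notes on version B (the rewrite author's own statement) =====
-- stated objective: simpler
-- what changed: Replaced A's single-pass top-two tracking loop with a full descending sort followed by explicit indexing of the first two elements (preserving the IndexError on lists shorter than 2).
import Mathlib
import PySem

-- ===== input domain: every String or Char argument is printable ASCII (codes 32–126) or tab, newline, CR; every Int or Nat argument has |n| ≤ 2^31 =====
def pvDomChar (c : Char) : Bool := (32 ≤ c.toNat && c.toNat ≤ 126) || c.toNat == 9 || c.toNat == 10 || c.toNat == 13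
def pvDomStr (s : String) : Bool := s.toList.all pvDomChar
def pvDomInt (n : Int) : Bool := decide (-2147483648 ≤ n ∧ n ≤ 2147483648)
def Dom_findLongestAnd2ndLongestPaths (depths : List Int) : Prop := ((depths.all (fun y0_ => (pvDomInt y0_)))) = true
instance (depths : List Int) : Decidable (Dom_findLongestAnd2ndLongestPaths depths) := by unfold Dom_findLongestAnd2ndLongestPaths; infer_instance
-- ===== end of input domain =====

-- B replaces A's single-pass top-two tracking by a full descending sort followed by
-- indexing the first two elements (objective: simpler).


-- ===== PORT A =====
-- A's loop body ('for i in range(2, len(depths)): depth = depths[i] …'); i always in range,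
-- so pyGetD with default 0 is exact there.
def pvStepA (st : Int × Int) (depth : Int) : Int × Int :=
  if depth > st.1 then (depth, st.1)
  else if depth > st.2 then (st.1, depth)
  else st

def findLongestAnd2ndLongestPaths (depths : List Int) : List Int :=
  match PySem.List.pyGet? depths 0, PySem.List.pyGet? depths 1 with
  | some d0, some d1 =>
      let p := (PySem.List.pyRange 2 (PySem.List.len depths)).foldl
        (fun st i => pvStepA st (PySem.List.pyGetD depths i 0))
        (max d0 d1, min d0 d1)
      [p.1, p.2]
  | _, _ => []   -- Python raises IndexError here (len < 2); excluded by Pre_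

-- ===== PORT B =====
def findLongestAnd2ndLongestPaths_alt (depths : List Int) : List Int :=
  let s := PySem.List.sorted depths (fun x => x) true
  match PySem.List.pyGet? s 0 with
  | none => []   -- Python raises IndexError here (len < 2); excluded by Pre_
  | some x =>
    match PySem.List.pyGet? s 1 with
    | none => []   -- IndexError likewise
    | some y => [x, y]

-- ===== PRECONDITION & SPEC =====
-- Both Pythons raise IndexError on lists of fewer than two elements (depths[1] in A, s[1] in B).
def Pre_findLongestAnd2ndLongestPaths (depths : List Int) : Prop := 2 ≤ depths.length
instance (depths : List Int) : Decidable (Pre_findLongestAnd2ndLongestPaths depths) := by unfold Pre_findLongestAnd2ndLongestPaths; infer_instance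
def pvWitness_findLongestAnd2ndLongestPaths : List Int := [3, 7, 7, 2]

def Spec_findLongestAnd2ndLongestPaths (depths : List Int) (out : List Int) : Prop := out = findLongestAnd2ndLongestPaths_alt depths
instance (depths : List Int) (out : List Int) : Decidable (Spec_findLongestAnd2ndLongestPaths depths out) := by unfold Spec_findLongestAnd2ndLongestPaths; infer_instance

-- ===== CLAIM (what is proved, stated in full; the proofs are below) =====
def Claim_equal_findLongestAnd2ndLongestPaths : Prop := ∀ (depths : List Int), Dom_findLongestAnd2ndLongestPaths depths → Pre_findLongestAnd2ndLongestPaths depths → Spec_findLongestAnd2ndLongestPaths depths (findLongestAnd2ndLongestPaths depths)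

-- ===== LEMMAS AND PROOFS =====

-- Invariant of B's insertion sort vs A's state: inserting elements one by one into a list
-- whose first two entries are A's (longest, secondLongest) keeps A's state as the first two entries.
lemma pv_ins_inv (xs : List Int) : ∀ (l s : Int) (rest : List Int),
    ∃ rest', xs.foldl (fun acc x => PySem.List.insertBy (fun a b => decide (b < a)) x acc) (l :: s :: rest)
      = (xs.foldl pvStepA (l, s)).1 :: (xs.foldl pvStepA (l, s)).2 :: rest' := by
  induction xs with
  | nil => intro l s rest; exact ⟨rest, rfl⟩
  | cons d xs ih =>
    intro l s rest
    simp only [List.foldl_cons]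
    by_cases h1 : l < d
    · have : PySem.List.insertBy (fun a b => decide (b < a)) d (l :: s :: rest)
          = d :: l :: s :: rest := by simp [PySem.List.insertBy, h1]
      rw [this]
      have hst : pvStepA (l, s) d = (d, l) := by simp [pvStepA, h1]
      rw [hst]; exact ih d l (s :: rest)
    · by_cases h2 : s < d
      · have : PySem.List.insertBy (fun a b => decide (b < a)) d (l :: s :: rest)
            = l :: d :: s :: rest := by simp [PySem.List.insertBy, h1, h2]
        rw [this]
        have hst : pvStepA (l, s) d = (l, d) := by simp [pvStepA, h1, h2]
        rw [hst]; exact ih l d (s :: rest)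
      · have : PySem.List.insertBy (fun a b => decide (b < a)) d (l :: s :: rest)
            = l :: s :: PySem.List.insertBy (fun a b => decide (b < a)) d rest := by
          simp [PySem.List.insertBy, h1, h2]
        rw [this]
        have hst : pvStepA (l, s) d = (l, s) := by simp [pvStepA, h1, h2]
        rw [hst]; exact ih l s _

-- The first two insertions seed the list with (max, min) of the first two elements.
lemma pv_ins_seed (a b : Int) :
    PySem.List.insertBy (fun p q => decide (q < p)) b
        (PySem.List.insertBy (fun p q => decide (q < p)) a [])
      = max a b :: min a b :: [] := by
  by_cases h : a < b
  · simp [PySem.List.insertBy, h, max_eq_right h.le, min_eq_left h.le]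
  · simp [PySem.List.insertBy, h, max_eq_left (not_lt.mp h), min_eq_right (not_lt.mp h)]

-- ===== VERDICT (by name: the statement is the Claim_ definition above) =====
theorem findLongestAnd2ndLongestPaths_spec : Claim_equal_findLongestAnd2ndLongestPaths := by
  intro depths _ hpre
  unfold Pre_findLongestAnd2ndLongestPaths at hpre
  match depths, hpre with
  | a :: b :: xs, _ =>
    unfold Spec_findLongestAnd2ndLongestPaths
    unfold findLongestAnd2ndLongestPaths findLongestAnd2ndLongestPaths_alt
    -- B side: characterise the sorted list
    have hsorted := PySem.List.sorted_rev_eq_foldl_insertBy (a :: b :: xs) (fun x => x)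
    simp only [List.foldl_cons] at hsorted
    rw [pv_ins_seed a b] at hsorted
    obtain ⟨rest', hr⟩ := pv_ins_inv xs (max a b) (min a b) []
    rw [hr] at hsorted
    -- A side: turn the index loop into a fold over the tail
    have hA := PySem.List.foldl_pyRange_pyGetD (a :: b :: xs) 0
      (fun st depth => pvStepA st depth) (max a b, min a b) (a := 2) (by norm_num)
    simp only [pysem, List.length_cons] at hA
    push_cast at hA
    norm_num [List.drop_succ_cons] at hA
    have h1 : (0:Int) ≤ (xs.length : Int) + 1 := by positivity
    have h2 : (0:Int) ≤ (rest'.length : Int) + 1 := by positivity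
    simp [hsorted, hA, PySem.List.pyGet?, PySem.List.pyIdx?, h1, h2]
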